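-- pv_equiv track=rewrite | github.com/Pixel-Tomiii/advent-of-code-2021 | Day 12/part 2.py | count_small_caves
-- ===== SOURCE A (Python) =====
-- def count_small_caves(path):
--     """Returns true if there is at least 2 of a small cave"""
--     small_caves = set()
--     for cave in path:
--         # Small caves only.
--         if cave.islower():
--             if cave not in small_caves:
--                 small_caves.add(cave)
--             # If cave is already in set it must be there twice.
--             else:
--                 return True
--
--     return False
-- ===== SOURCE B (Python) =====
-- def count_small_caves(path):
--     """Returns true if there is at least 2 of a small cave"""
--     lowers = sorted(cave for cave in path if cave.islower())
--     return any(a == b for a, b in zip(lowers, lowers[1:]))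
-- ===== Notes on version B (the rewrite author's own statement) =====
-- stated objective: alternative
-- what changed: Replaces A's incremental scan with a growing membership set by a sort-then-scan: sort the lowercase caves and report whether any two adjacent sorted elements are equal (a duplicate exists iff equal elements become adjacent after sorting); no set is used at all.
import Mathlib
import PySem

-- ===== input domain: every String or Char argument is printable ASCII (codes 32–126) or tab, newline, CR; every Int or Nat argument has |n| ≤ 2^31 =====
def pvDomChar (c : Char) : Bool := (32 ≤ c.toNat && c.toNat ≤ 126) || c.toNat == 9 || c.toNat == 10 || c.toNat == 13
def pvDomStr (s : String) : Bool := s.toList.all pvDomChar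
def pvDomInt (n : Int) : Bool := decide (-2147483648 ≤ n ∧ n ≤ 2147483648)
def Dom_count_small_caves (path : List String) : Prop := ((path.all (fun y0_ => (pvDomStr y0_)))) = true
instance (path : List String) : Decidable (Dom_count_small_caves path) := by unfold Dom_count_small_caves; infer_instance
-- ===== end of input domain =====

-- B is an alternative algorithm: it sorts the lowercase caves and reports whether
-- any two adjacent sorted elements are equal, instead of A's early-exit scan with
-- a growing membership set.

-- shared port of Python's str.islower(): at least one cased char and no uppercase char
-- (exact on the ASCII domain, where the cased characters are exactly the letters)
def strIslower (s : String) : Bool :=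
  s.toList.any PySem.Chars.islower && s.toList.all (fun c => !PySem.Chars.isupper c)

-- ===== PORT A =====
def count_small_cavesGo : List String → PySem.Set String → Bool
  | [], _ => false
  | cave :: rest, small_caves =>
    if strIslower cave then
      if ¬ PySem.Set.contains small_caves cave then
        count_small_cavesGo rest (PySem.Set.add small_caves cave)
      else
        true
    else
      count_small_cavesGo rest small_caves

def count_small_caves (path : List String) : Bool :=
  count_small_cavesGo path PySem.Set.empty

-- ===== PORT B =====
-- lowers[1:] is List.drop 1 (exact for this nonnegative slice)
def count_small_caves_alt (path : List String) : Bool :=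
  let lowers := PySem.List.sorted (path.filter strIslower) (fun x => x) false
  (lowers.zip (lowers.drop 1)).any (fun p => p.1 == p.2)

-- ===== PRECONDITION & SPEC =====
def Spec_count_small_caves (path : List String) (out : Bool) : Prop := out = count_small_caves_alt path
instance (path : List String) (out : Bool) : Decidable (Spec_count_small_caves path out) := by unfold Spec_count_small_caves; infer_instance

-- ===== CLAIM (what is proved, stated in full; the proofs are below) =====
def Claim_equal_count_small_caves : Prop := ∀ (path : List String), Dom_count_small_caves path → Spec_count_small_caves path (count_small_caves path)

-- ===== LEMMAS AND PROOFS =====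

theorem set_contains_iff (s : List String) (c : String) :
    PySem.Set.contains s c = true ↔ c ∈ s := by
  simp [PySem.Set.contains]

-- characterization of A's scan: it returns false iff the lowercase caves seen are
-- pairwise distinct and fresh w.r.t. the accumulator
theorem go_false_iff (path : List String) (s : List String) :
    count_small_cavesGo path s = false ↔
      ((path.filter strIslower).Nodup ∧
        ∀ x ∈ path.filter strIslower, x ∉ s) := by
  induction path generalizing s with
  | nil => simp [count_small_cavesGo]
  | cons cave rest ih =>
    by_cases hl : strIslower cave
    · by_cases hc : cave ∈ s
      · have hcb : PySem.Set.contains s cave = true := (set_contains_iff s cave).mpr hc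
        have hgo : count_small_cavesGo (cave :: rest) s = true := by
          simp only [count_small_cavesGo, hl, hcb]
          simp
        rw [hgo]
        simp only [List.filter_cons, hl, if_pos, Bool.true_eq_false, false_iff, not_and]
        intro _ hall
        exact absurd hc (hall cave (by simp))
      · have hcb : PySem.Set.contains s cave = false := by
          rw [Bool.eq_false_iff]
          exact fun hb => hc ((set_contains_iff s cave).mp hb)
        have hadd : PySem.Set.add s cave = s ++ [cave] := by simp [PySem.Set.add, hc]
        have hgo : count_small_cavesGo (cave :: rest) s
            = count_small_cavesGo rest (s ++ [cave]) := by
          simp only [count_small_cavesGo, hl, hcb, hadd]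
          simp
        rw [hgo, ih]
        simp only [List.filter_cons, hl, if_pos, List.nodup_cons, List.mem_cons,
          List.mem_append, List.not_mem_nil, or_false]
        constructor
        · rintro ⟨hnd, hall⟩
          refine ⟨⟨fun hm => (hall cave hm) (Or.inr rfl), hnd⟩, ?_⟩
          rintro x (rfl | hx) hxs
          · exact hc hxs
          · exact (hall x hx) (Or.inl hxs)
        · rintro ⟨⟨hni, hnd⟩, hall⟩
          refine ⟨hnd, ?_⟩
          rintro x hx (hxs | rfl)
          · exact (hall x (Or.inr hx)) hxs
          · exact hni hx
    · have hgo : count_small_cavesGo (cave :: rest) s = count_small_cavesGo rest s := by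
        simp only [count_small_cavesGo, hl]
        simp
      rw [hgo, ih]
      simp [hl]

-- on a ≤-sorted list, an adjacent equal pair exists iff the list has a duplicate
theorem adj_dup_iff (l : List String) (h : l.Pairwise (· ≤ ·)) :
    ((l.zip (l.drop 1)).any (fun p => p.1 == p.2) = true) ↔ ¬ l.Nodup := by
  induction l with
  | nil => simp
  | cons a t ih =>
    cases t with
    | nil => simp
    | cons b t' =>
      have hpw : (b :: t').Pairwise (· ≤ ·) := h.sublist (List.sublist_cons_self _ _)
      have hab : a ≤ b := (List.pairwise_cons.mp h).1 b (by simp)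
      by_cases heq : a = b
      · subst heq
        simp only [List.drop_succ_cons, List.drop_zero, List.zip_cons_cons,
          List.any_cons, beq_self_eq_true, Bool.true_or, true_iff]
        intro hnd
        exact (List.nodup_cons.mp hnd).1 (by simp)
      · have hane : ∀ x ∈ b :: t', a ≠ x := by
          rintro x hx rfl
          rcases List.mem_cons.mp hx with rfl | hx'
          · exact heq rfl
          · have hbx : b ≤ a := (List.pairwise_cons.mp hpw).1 a hx'
            exact heq (le_antisymm hab hbx)
        have hzip : ((a :: b :: t').zip ((a :: b :: t').drop 1))
            = (a, b) :: ((b :: t').zip ((b :: t').drop 1)) := by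
          simp
        rw [hzip]
        simp only [List.any_cons, Bool.or_eq_true, beq_iff_eq]
        rw [ih hpw]
        constructor
        · rintro (rfl | hdup)
          · exact absurd rfl heq
          · intro hnd
            exact hdup (List.nodup_cons.mp hnd).2
        · intro hnd
          right
          intro hnd'
          exact hnd (List.nodup_cons.mpr ⟨fun hx => hane a (by
            exact hx) rfl, hnd'⟩)

-- ===== VERDICT (by name: the statement is the Claim_ definition above) =====
theorem count_small_caves_spec : Claim_equal_count_small_caves := by
  intro path _
  unfold Spec_count_small_caves count_small_caves count_small_caves_alt
  rw [show (PySem.Set.empty : PySem.Set String) = [] from rfl]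
  set f := path.filter strIslower with hf
  set l := PySem.List.sorted f (fun x => x) false with hl
  have hpw : l.Pairwise (fun a b => a ≤ b) := PySem.List.sorted_pairwise f (fun x => x)
  have hperm : l.Perm f := PySem.List.sorted_perm f (fun x => x) false
  have hA := go_false_iff path []
  simp only [List.not_mem_nil, not_false_iff, implies_true, and_true] at hA
  have hnd : l.Nodup ↔ f.Nodup := hperm.nodup_iff
  have hadj := adj_dup_iff l hpw
  rcases hgo : count_small_cavesGo path [] with _ | _
  · have hfn : f.Nodup := (hA.mp (by exact hgo))
    symm
    rw [Bool.eq_false_iff]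
    intro hany
    exact (hadj.mp hany) (hnd.mpr hfn)
  · symm
    rw [hadj, hnd]
    intro hfn
    rw [hA.mpr hfn] at hgo
    simp at hgo
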